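-- pv_equiv track=rewrite | github.com/daniel-reich/turbo-robot | LMoP4Jhpm9kx4WQ3a_11.py | is_ascending
-- ===== SOURCE A (Python) =====
-- def is_ascending(s):
--
--   Sample_A = str(s)
--   Length = len(Sample_A)
--   Ending = 1
--
--   while (Ending < Length - 1):
--
--     Sample_B = Sample_A[0:Ending]
--     Number = int(Sample_B) + 1
--
--     Length_A = len(Sample_A)
--     Length_B = len(Sample_B)
--
--     while (Length_B < Length_A):
--       Sample_B = Sample_B + str(Number)
--       Number += 1
--       Length_A = len(Sample_A)
--       Length_B = len(Sample_B)
--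
--     if (Sample_A == Sample_B):
--       return True
--     else:
--       Ending += 1
--
--   return False
-- ===== SOURCE B (Python) =====
-- def is_ascending(s):
--     s = str(s)
--     n = len(s)
--     memo = {}
--
--     def run(i, v):
--         # True iff the suffix starting at i spells the consecutive integers v, v+1, ... exactly
--         if (i, v) in memo:
--             return memo[(i, v)]
--         t = str(v)
--         res = s[i:i + len(t)] == t and (i + len(t) == n or run(i + len(t), v + 1))
--         memo[(i, v)] = res
--         return res
--
--     for p in range(1, n - 1):
--         try:
--             a = int(s[:p])
--         except ValueError:
--             continue
--         if run(p, a + 1):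
--             return True
--     return False
-- ===== Notes on version B (the rewrite author's own statement) =====
-- stated objective: alternative
-- what changed: B replaces A's per-candidate rebuild-the-whole-concatenation-and-compare loop with a memoized recursive predicate run(i,v) stating that the suffix starting at position i spells the consecutive integers v, v+1, ... exactly; the (position,value) subproblems live in a dict shared across candidate prefix lengths, so no candidate string is ever built.
-- outside the precondition, e.g. on is_ascending('12 1314'): A returns True, B returns True
import Mathlib
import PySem

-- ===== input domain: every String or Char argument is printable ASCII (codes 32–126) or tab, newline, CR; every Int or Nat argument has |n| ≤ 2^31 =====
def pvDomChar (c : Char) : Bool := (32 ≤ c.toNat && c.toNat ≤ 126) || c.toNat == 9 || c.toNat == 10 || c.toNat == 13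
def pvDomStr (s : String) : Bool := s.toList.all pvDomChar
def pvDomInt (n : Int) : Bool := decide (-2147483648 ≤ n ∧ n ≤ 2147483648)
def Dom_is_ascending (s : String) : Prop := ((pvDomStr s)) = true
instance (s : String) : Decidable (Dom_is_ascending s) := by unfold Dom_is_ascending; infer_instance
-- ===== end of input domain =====

-- B replaces A's per-candidate rebuild-the-whole-concatenation-and-compare loop by a memoized
-- recursive suffix predicate run(i,v) over (position, value) subproblems kept in a dict shared
-- across candidate prefix lengths; no candidate string is ever built (objective: alternative).
-- The `fuel` parameters only make the recursions structural; each is called with enough fuel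
-- (each step strictly advances towards the string's end), so no fuel-0 branch is ever reached.

-- ===== PORT A =====
-- inner while loop: Sample_B = Sample_B + str(Number); Number += 1  (until len(Sample_B) ≥ len(Sample_A))
def pvBuildA (L : Nat) : Nat → List Char → Int → List Char
  | 0, c, _ => c
  | fuel + 1, c, m =>
    if c.length < L then pvBuildA L fuel (c ++ PySem.Int.toChars m) (m + 1) else c

-- outer while loop over Ending; the `none` branch is Python's int() raising ValueError (excluded by Pre_)
def pvOuterA (l : List Char) : Nat → Nat → Bool
  | 0, _ => false
  | fuel + 1, e =>
    if e < l.length - 1 then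
      match PySem.Int.ofChars? (PySem.List.slice l (some 0) (some (e : Int))) with
      | none => false
      | some n0 =>
        if l = pvBuildA l.length (l.length + 1) (PySem.List.slice l (some 0) (some (e : Int))) (n0 + 1)
        then true
        else pvOuterA l fuel (e + 1)
    else false

def is_ascending (s : String) : Bool := pvOuterA s.toList (s.toList.length + 1) 1

-- ===== PORT B =====
-- run(i, v) with the memo dict threaded through; the slice test s[i:i+len(t)] == t is ported as
-- (l.drop i).take t.length = t, exact for these non-negative bounds (PySem.List.slice_natCast_add)
def pvRunM (l : List Char) : Nat → PySem.Dict (Nat × Int) Bool → Nat → Int →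
    Bool × PySem.Dict (Nat × Int) Bool
  | 0, memo, _, _ => (false, memo)
  | fuel + 1, memo, i, v =>
    match memo.get? (i, v) with
    | some b => (b, memo)
    | none =>
      let t := PySem.Int.toChars v
      if (l.drop i).take t.length = t then
        if i + t.length = l.length then (true, memo.insert (i, v) true)
        else
          let r := pvRunM l fuel memo (i + t.length) (v + 1)
          (r.1, r.2.insert (i, v) r.1)
      else (false, memo.insert (i, v) false)

-- for p in range(1, n-1), threading the memo; the `none` branch is the `except ValueError: continue`
def pvLoopB (l : List Char) : Nat → PySem.Dict (Nat × Int) Bool → Nat → Bool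
  | 0, _, _ => false
  | fuel + 1, memo, p =>
    if p < l.length - 1 then
      match PySem.Int.ofChars? (l.take p) with
      | none => pvLoopB l fuel memo (p + 1)
      | some a =>
        let r := pvRunM l (l.length + 1) memo p (a + 1)
        if r.1 then true else pvLoopB l fuel r.2 (p + 1)
    else false

def is_ascending_alt (s : String) : Bool :=
  pvLoopB s.toList (s.toList.length + 1) PySem.Dict.empty 1

-- ===== PRECONDITION & SPEC =====
-- Pre_ excludes strings of length ≥ 3 having a prefix of length ≤ len-2 that int() cannot parse:
-- on these A usually raises ValueError; on the rare ones where an earlier split already matches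
-- (e.g. '12 1314') A returns True and B agrees, but they are excluded with the rest.
def Pre_is_ascending (s : String) : Prop :=
  ∀ k ∈ List.range' 1 (s.toList.length - 2),
    (PySem.Int.ofChars? (s.toList.take k)).isSome = true
instance (s : String) : Decidable (Pre_is_ascending s) := by unfold Pre_is_ascending; infer_instance

def pvWitness_is_ascending : String := "123"

def Spec_is_ascending (s : String) (out : Bool) : Prop := out = is_ascending_alt s
instance (s : String) (out : Bool) : Decidable (Spec_is_ascending s out) := by unfold Spec_is_ascending; infer_instance

-- ===== CLAIM (what is proved, stated in full; the proofs are below) =====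
def Claim_equal_is_ascending : Prop := ∀ (s : String), Dom_is_ascending s → Pre_is_ascending s → Spec_is_ascending s (is_ascending s)

-- ===== LEMMAS AND PROOFS =====

-- str(Number) is never empty
theorem pvToDigitsCore_le (b : Nat) : ∀ (f n : Nat) (l : List Char),
    l.length ≤ (Nat.toDigitsCore b f n l).length := by
  intro f
  induction f with
  | zero => intro n l; simp [Nat.toDigitsCore]
  | succ f ih =>
    intro n l
    simp only [Nat.toDigitsCore]
    split
    · simp
    · exact le_trans (by simp) (ih (n / b) (Nat.digitChar (n % b) :: l))

theorem pvToChars_len_pos (m : Int) : 0 < (PySem.Int.toChars m).length := by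
  unfold PySem.Int.toChars Nat.toDigits
  split
  · simp
  · have h := pvToDigitsCore_le 10 m.toNat (m.toNat / 10) [Nat.digitChar (m.toNat % 10)]
    simp only [Nat.toDigitsCore]
    split
    · simp
    · calc 0 < 1 := Nat.one_pos
        _ ≤ _ := by simpa using h

theorem pvSlice_take (l : List Char) (p : Nat) :
    PySem.List.slice l (some 0) (some (p : Int)) = l.take p := by
  simp [PySem.List.slice_zero_start, PySem.List.slice_to_natCast]

-- with exhausted condition the builder stops, whatever the fuel
theorem pvBuildA_stop (L : Nat) (fuel : Nat) (c : List Char) (m : Int) (h : ¬ c.length < L) :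
    pvBuildA L fuel c m = c := by
  cases fuel with
  | zero => rfl
  | succ fuel => rw [pvBuildA, if_neg h]

-- the built string always extends the prefix it started from
theorem pvBuildA_prefix (L : Nat) : ∀ (fuel : Nat) (c : List Char) (m : Int),
    c <+: pvBuildA L fuel c m := by
  intro fuel
  induction fuel with
  | zero => intro c m; exact List.prefix_refl _
  | succ fuel ih =>
    intro c m
    rw [pvBuildA]
    split
    · exact List.IsPrefix.trans (List.prefix_append _ _) (ih _ _)
    · exact List.prefix_refl _

-- proof-side memo-free version of run(i, v)
def pvRun (l : List Char) (i : Nat) (v : Int) : Bool :=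
  let t := PySem.Int.toChars v
  if hm : (l.drop i).take t.length = t then
    if i + t.length = l.length then true
    else pvRun l (i + t.length) (v + 1)
  else false
  termination_by l.length - i
  decreasing_by
    have h1 := pvToChars_len_pos v
    have h2 := congrArg List.length hm
    simp only [List.length_take, List.length_drop, t] at h2 ⊢
    omega

-- every value stored in the memo is the value of pvRun
def pvMemoOK (l : List Char) (memo : PySem.Dict (Nat × Int) Bool) : Prop :=
  ∀ i v b, memo.get? (i, v) = some b → b = pvRun l i v

theorem pvMemoOK_insert (l : List Char) (memo : PySem.Dict (Nat × Int) Bool)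
    (i : Nat) (v : Int) (h : pvMemoOK l memo) :
    pvMemoOK l (memo.insert (i, v) (pvRun l i v)) := by
  intro i' v' b hb
  rw [PySem.Dict.get?_insert] at hb
  split at hb
  · rename_i heq
    cases hb
    cases Prod.mk.injEq .. ▸ heq
    simp_all
  · exact h i' v' b hb

-- with enough fuel the memoized run returns pvRun and keeps the memo correct
theorem pvRunM_correct (l : List Char) : ∀ (fuel : Nat) (memo : PySem.Dict (Nat × Int) Bool)
    (i : Nat) (v : Int), l.length - i < fuel → pvMemoOK l memo →
    (pvRunM l fuel memo i v).1 = pvRun l i v ∧ pvMemoOK l (pvRunM l fuel memo i v).2 := by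
  intro fuel
  induction fuel with
  | zero => intro memo i v hf _; omega
  | succ fuel ih =>
    intro memo i v hf hok
    rw [pvRunM]
    cases hget : memo.get? (i, v) with
    | some b => exact ⟨hok i v b hget, hok⟩
    | none =>
      simp only
      by_cases hm : (l.drop i).take (PySem.Int.toChars v).length = PySem.Int.toChars v
      · rw [if_pos hm]
        by_cases he : i + (PySem.Int.toChars v).length = l.length
        · rw [if_pos he]
          have hr : pvRun l i v = true := by rw [pvRun]; simp only [dif_pos hm, if_pos he]
          have hins := pvMemoOK_insert l memo i v hok
          rw [hr] at hins
          exact ⟨hr.symm, hins⟩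
        · rw [if_neg he]
          have h1 := pvToChars_len_pos v
          have h2 := congrArg List.length hm
          simp only [List.length_take, List.length_drop] at h2
          have hrec := ih memo (i + (PySem.Int.toChars v).length) (v + 1) (by omega) hok
          have hr : pvRun l i v = pvRun l (i + (PySem.Int.toChars v).length) (v + 1) := by
            rw [pvRun]; simp only [dif_pos hm, if_neg he]
          refine ⟨by simp only [hrec.1, hr], ?_⟩
          have hins := pvMemoOK_insert l
            (pvRunM l fuel memo (i + (PySem.Int.toChars v).length) (v + 1)).2 i v hrec.2
          simp only [hrec.1, ← hr]
          exact hins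
      · rw [if_neg hm]
        have hr : pvRun l i v = false := by rw [pvRun]; simp only [dif_neg hm]
        have hins := pvMemoOK_insert l memo i v hok
        rw [hr] at hins
        exact ⟨hr.symm, hins⟩

-- key lemma: A's build-and-compare succeeds iff B's suffix predicate holds after the prefix
theorem pvKey (l : List Char) : ∀ (fuel : Nat) (c : List Char) (m : Int),
    c.length < l.length → l.length - c.length < fuel →
    ((l = pvBuildA l.length fuel c (m + 1)) ↔
      (l.take c.length = c ∧ pvRun l c.length (m + 1) = true)) := by
  intro fuel
  induction fuel with
  | zero => intro c m hlt hf; omega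
  | succ fuel ih =>
    intro c m hlt hf
    rw [pvBuildA, if_pos hlt, pvRun]
    set t := PySem.Int.toChars (m + 1) with ht
    have htl : 0 < t.length := by rw [ht]; exact pvToChars_len_pos (m + 1)
    by_cases hm : (l.drop c.length).take t.length = t
    · have hlen : c.length + t.length ≤ l.length := by
        have := congrArg List.length hm
        simp only [List.length_take, List.length_drop] at this
        omega
      simp only [dif_pos hm]
      by_cases he : c.length + t.length = l.length
      · rw [if_pos he, pvBuildA_stop _ _ _ _ (by simp only [List.length_append]; omega)]
        constructor
        · intro hb
          refine ⟨?_, rfl⟩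
          rw [hb, List.take_left]
        · rintro ⟨h1, _⟩
          have hdl : l.drop c.length = t := by
            have : (l.drop c.length).length = t.length := by
              simp only [List.length_drop]; omega
            rw [← hm, ← this, List.take_length]
          calc l = l.take c.length ++ l.drop c.length := (List.take_append_drop _ _).symm
            _ = c ++ t := by rw [h1, hdl]
      · rw [if_neg he]
        have ihh := ih (c ++ t) (m + 1)
          (by simp only [List.length_append]; omega)
          (by simp only [List.length_append]; omega)
        simp only [List.length_append] at ihh
        rw [ihh]
        constructor
        · rintro ⟨h1, h2⟩
          refine ⟨?_, h2⟩
          rw [List.take_add, hm] at h1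
          exact (List.append_left_inj t).mp h1
        · rintro ⟨h1, h2⟩
          refine ⟨?_, h2⟩
          rw [List.take_add, hm, h1]
    · simp only [dif_neg hm]
      constructor
      · intro hb
        exfalso
        have hpre : (c ++ t) <+: l := hb ▸ pvBuildA_prefix l.length fuel (c ++ t) (m + 1 + 1)
        obtain ⟨r, hr⟩ := hpre
        apply hm
        rw [← hr, List.append_assoc, List.drop_left, List.take_left]
      · rintro ⟨_, h2⟩
        exact absurd h2 (by simp)

-- under Pre_, A's loop and B's memo-threading loop agree step by step (same fuel on both sides)
theorem pvLoops (l : List Char)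
    (hpre : ∀ k ∈ List.range' 1 (l.length - 2), (PySem.Int.ofChars? (l.take k)).isSome = true) :
    ∀ (fuel e : Nat) (memo : PySem.Dict (Nat × Int) Bool), 1 ≤ e →
      pvMemoOK l memo → pvOuterA l fuel e = pvLoopB l fuel memo e := by
  intro fuel
  induction fuel with
  | zero => intro e memo _ _; rfl
  | succ fuel ihn =>
    intro e memo he hok
    rw [pvOuterA, pvLoopB]
    by_cases hel : e < l.length - 1
    · rw [if_pos hel, if_pos hel]
      have hp : (PySem.Int.ofChars? (l.take e)).isSome = true := by
        apply hpre
        rw [List.mem_range'_1]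
        omega
      obtain ⟨a, ha⟩ := Option.isSome_iff_exists.mp hp
      have hcl : (l.take e).length = e := by
        rw [List.length_take]
        omega
      have hrc := pvRunM_correct l (l.length + 1) memo e (a + 1) (by omega) hok
      have hkey := pvKey l (l.length + 1) (l.take e) a (by omega) (by omega)
      rw [hcl] at hkey
      simp only [true_and] at hkey
      rw [pvSlice_take, ha]
      simp only
      by_cases hr : pvRun l e (a + 1) = true
      · rw [if_pos (hkey.mpr hr), if_pos (hrc.1.trans hr)]
      · rw [if_neg (fun h => hr (hkey.mp h)), if_neg (by simp only [hrc.1]; exact hr),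
          ihn (e + 1) _ (by omega) hrc.2]
    · rw [if_neg hel, if_neg hel]

-- ===== VERDICT (by name: the statement is the Claim_ definition above) =====
theorem is_ascending_spec : Claim_equal_is_ascending := by
  intro s _ hpre
  unfold Spec_is_ascending is_ascending is_ascending_alt
  exact pvLoops s.toList hpre (s.toList.length + 1) 1 PySem.Dict.empty (by omega)
    (fun i v b hb => by rw [PySem.Dict.get?_empty] at hb; cases hb)
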